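-- pv_equiv track=rewrite | github.com/kherrera1517/Python | CS5/hw3pr3.py | check
-- ===== SOURCE A (Python) =====
-- def check(playerList, string, wordList):
--     if playerList == []:
--         return True
--     elif string == "":
--         return False
--     elif playerList[0] in wordList and playerList[0] in string:
--         index = string.index(playerList[0]) + len(playerList[0])
--         return check(playerList[1:], string[index:], wordList)
--     else:
--         return False
-- ===== SOURCE B (Python) =====
-- def check(playerList, string, wordList):
--     # Iterative: loop over playerList threading the remaining string; no recursion, no list slicing.
--     for word in playerList:
--         if string == "":
--             return False
--         if word in wordList and word in string:
--             string = string[string.index(word) + len(word):]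
--         else:
--             return False
--     return True
-- ===== Notes on version B (the rewrite author's own statement) =====
-- stated objective: simpler
-- what changed: Replaces the tail recursion that copies playerList[1:] at every step by a single for-loop threading the remaining string in a local variable.
import Mathlib
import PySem

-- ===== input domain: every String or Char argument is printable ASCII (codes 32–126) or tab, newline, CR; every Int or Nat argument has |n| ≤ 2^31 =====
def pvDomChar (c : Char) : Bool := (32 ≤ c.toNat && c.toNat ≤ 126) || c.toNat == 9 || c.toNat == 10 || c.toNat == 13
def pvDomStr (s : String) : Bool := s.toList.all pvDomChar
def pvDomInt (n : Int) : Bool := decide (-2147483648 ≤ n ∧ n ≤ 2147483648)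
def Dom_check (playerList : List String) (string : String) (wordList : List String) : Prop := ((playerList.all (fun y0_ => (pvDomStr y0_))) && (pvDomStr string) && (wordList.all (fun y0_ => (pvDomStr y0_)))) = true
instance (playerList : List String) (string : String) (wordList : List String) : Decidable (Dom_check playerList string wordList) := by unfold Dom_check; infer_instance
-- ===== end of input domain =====

-- B replaces A's tail recursion (which slices playerList[1:] each call) by one for-loop threading
-- the remaining string in a local variable: a plainer iterative decomposition, same results.

-- ===== PORT A =====
-- A's recursion: empty playerList → True; empty string → False; head word present in wordList and
-- in string → recurse on the tail with the string after that occurrence; otherwise False.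
def check (playerList : List String) (string : String) (wordList : List String) : Bool :=
  match playerList with
  | [] => true
  | w :: rest =>
    if string == "" then false
    else if wordList.contains w && PySem.Str.isIn w string then
      -- index = string.index(w) + len(w); string.index is guarded by 'w in string', so find = index
      let index := PySem.Str.find string w + (PySem.Str.len w : Int)
      check rest (PySem.Str.slice string (some index) none) wordList
    else false

-- ===== PORT B =====
-- B's loop: fold over playerList; the state is 'some s' (remaining string) or 'none' (returned False).
def checkStep (wordList : List String) (st : Option String) (word : String) : Option String :=
  match st with
  | none => none
  | some s =>
    if s == "" then none
    else if wordList.contains word && PySem.Str.isIn word s then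
      some (PySem.Str.slice s (some (PySem.Str.find s word + (PySem.Str.len word : Int))) none)
    else none

def check_alt (playerList : List String) (string : String) (wordList : List String) : Bool :=
  (playerList.foldl (checkStep wordList) (some string)).isSome

-- ===== PRECONDITION & SPEC =====
def Spec_check (playerList : List String) (string : String) (wordList : List String) (out : Bool) : Prop := out = check_alt playerList string wordList
instance (playerList : List String) (string : String) (wordList : List String) (out : Bool) : Decidable (Spec_check playerList string wordList out) := by unfold Spec_check; infer_instance

-- ===== CLAIM (what is proved, stated in full; the proofs are below) =====
def Claim_equal_check : Prop := ∀ (playerList : List String) (string : String) (wordList : List String), Dom_check playerList string wordList → Spec_check playerList string wordList (check playerList string wordList)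

-- ===== LEMMAS AND PROOFS =====
theorem check_cons (w : String) (rest : List String) (string : String) (wordList : List String) :
    check (w :: rest) string wordList
      = if (string == "") = true then false
        else if (wordList.contains w && PySem.Str.isIn w string) = true then
          check rest (PySem.Str.slice string
            (some (PySem.Str.find string w + (PySem.Str.len w : Int))) none) wordList
        else false := rfl

theorem checkStep_some (wordList : List String) (s word : String) :
    checkStep wordList (some s) word
      = if (s == "") = true then none
        else if (wordList.contains word && PySem.Str.isIn word s) = true then
          some (PySem.Str.slice s
            (some (PySem.Str.find s word + (PySem.Str.len word : Int))) none)
        else none := rfl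

theorem foldl_none (playerList : List String) (wordList : List String) :
    playerList.foldl (checkStep wordList) none = none := by
  induction playerList with
  | nil => rfl
  | cons w rest ih => simpa [checkStep] using ih

theorem check_eq_alt (playerList : List String) (string : String) (wordList : List String) :
    check playerList string wordList = check_alt playerList string wordList := by
  induction playerList generalizing string with
  | nil => rfl
  | cons w rest ih =>
    show _ = (List.foldl (checkStep wordList) (checkStep wordList (some string) w) rest).isSome
    rw [check_cons, checkStep_some]
    by_cases h0 : (string == "") = true
    · rw [if_pos h0, if_pos h0, foldl_none]
      rfl
    · rw [if_neg h0, if_neg h0]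
      by_cases h1 : (wordList.contains w && PySem.Str.isIn w string) = true
      · rw [if_pos h1, if_pos h1]
        exact ih _
      · rw [if_neg h1, if_neg h1, foldl_none]
        rfl

-- ===== VERDICT (by name: the statement is the Claim_ definition above) =====
theorem check_spec : Claim_equal_check := by
  intro playerList string wordList _
  exact check_eq_alt playerList string wordList
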